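-- pv_equiv track=rewrite | github.com/cspyksma/Prediction-Edge | src/mlpm/features/utils.py | current_streak
-- ===== SOURCE A (Python) =====
-- def current_streak(results: list[bool]) -> int:
--     if not results:
--         return 0
--     latest = results[-1]
--     streak = 0
--     for result in reversed(results):
--         if result != latest:
--             break
--         streak += 1
--     return streak if latest else -streak
-- ===== SOURCE B (Python) =====
-- def current_streak(results: list[bool]) -> int:
--     # single forward pass tracking the current run (length, value)
--     streak = 0
--     latest = False
--     for r in results:
--         if streak and r == latest:
--             streak += 1
--         else:
--             streak = 1
--             latest = r
--     return streak if latest else -streak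
-- ===== Notes on version B (the rewrite author's own statement) =====
-- stated objective: alternative
-- what changed: B replaces A's reverse early-exit scan after a results[-1] lookup with a single forward fold maintaining (current run length, run value), needing no empty-list guard.
import Mathlib
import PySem

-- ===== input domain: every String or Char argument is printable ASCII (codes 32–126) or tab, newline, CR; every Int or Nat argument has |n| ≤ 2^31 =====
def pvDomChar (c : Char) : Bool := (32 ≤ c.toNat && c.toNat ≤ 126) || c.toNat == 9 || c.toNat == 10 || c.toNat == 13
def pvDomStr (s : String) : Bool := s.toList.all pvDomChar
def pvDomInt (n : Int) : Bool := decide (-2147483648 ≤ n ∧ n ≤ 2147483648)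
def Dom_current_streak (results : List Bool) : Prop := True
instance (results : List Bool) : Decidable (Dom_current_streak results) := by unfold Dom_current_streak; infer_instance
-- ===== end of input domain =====

-- B replaces A's reverse early-exit scan with a single forward fold tracking the current run; same value everywhere.

-- ===== PORT A =====
-- the `for result in reversed(results)` loop with its break, accumulating `streak`
def csLoop (xs : List Bool) (latest : Bool) (streak : Int) : Int :=
  match xs with
  | [] => streak
  | r :: rest => if r ≠ latest then streak else csLoop rest latest (streak + 1)

def current_streak (results : List Bool) : Int :=
  match results with
  | [] => 0
  | _ :: _ =>
    let latest := results.getLastD false   -- results[-1]; list is nonempty here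
    let streak := csLoop results.reverse latest 0
    if latest then streak else -streak

-- ===== PORT B =====
def csStep (p : Int × Bool) (r : Bool) : Int × Bool :=
  if p.1 ≠ 0 ∧ r == p.2 then (p.1 + 1, p.2) else (1, r)

def current_streak_alt (results : List Bool) : Int :=
  let st := results.foldl csStep (0, false)
  if st.2 then st.1 else -st.1

-- ===== PRECONDITION & SPEC =====
def Spec_current_streak (results : List Bool) (out : Int) : Prop := out = current_streak_alt results
instance (results : List Bool) (out : Int) : Decidable (Spec_current_streak results out) := by unfold Spec_current_streak; infer_instance

-- ===== CLAIM (what is proved, stated in full; the proofs are below) =====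
def Claim_equal_current_streak : Prop := ∀ (results : List Bool), Dom_current_streak results → Spec_current_streak results (current_streak results)

-- ===== LEMMAS AND PROOFS =====

-- prefix count: length of the prefix of xs equal to v
def pcount (xs : List Bool) (v : Bool) : Int :=
  match xs with
  | [] => 0
  | x :: rest => if x == v then 1 + pcount rest v else 0

theorem pcount_nonneg (xs : List Bool) (v : Bool) : 0 ≤ pcount xs v := by
  induction xs with
  | nil => simp [pcount]
  | cons x rest ih => simp only [pcount]; split <;> omega

theorem csLoop_eq (xs : List Bool) (v : Bool) (s : Int) :
    csLoop xs v s = s + pcount xs v := by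
  induction xs generalizing s with
  | nil => simp [csLoop, pcount]
  | cons x rest ih =>
    simp only [csLoop, pcount]
    by_cases h : x = v
    · simp only [h, if_true, BEq.rfl, ite_not]
      rw [ih]; ring
    · simp [h, ih]

-- the foldr form of B's fold, characterised on a cons
theorem foldr_csStep (v : Bool) (t : List Bool) :
    (v :: t).foldr (fun a s => csStep s a) (0, false) = (pcount (v :: t) v, v) := by
  induction t generalizing v with
  | nil => simp [csStep, pcount]
  | cons w t' ih =>
    have hne : pcount (w :: t') w ≠ 0 := by
      have := pcount_nonneg t' w
      simp only [pcount, BEq.rfl, if_true]; omega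
    show csStep ((w :: t').foldr (fun a s => csStep s a) (0, false)) v = _
    rw [ih w]
    by_cases h : v = w
    · subst h
      have h0 := pcount_nonneg t' v
      simp only [pcount, BEq.rfl, if_true] at h0 ⊢
      simp [csStep, pcount]
      split_ifs with hc
      · exfalso; omega
      · exact Prod.ext (by ring) rfl
    · simp [csStep, h, pcount, Ne.symm h]

theorem foldl_csStep (l : List Bool) :
    l.foldl csStep (0, false) = l.reverse.foldr (fun a s => csStep s a) (0, false) := by
  rw [← List.foldl_reverse, List.reverse_reverse]

-- ===== VERDICT (by name: the statement is the Claim_ definition above) =====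
theorem current_streak_spec : Claim_equal_current_streak := by
  intro results _
  unfold Spec_current_streak current_streak current_streak_alt
  match hl : results with
  | [] => simp
  | x :: rest =>
    have hrev : (x :: rest).reverse ≠ [] := by simp
    obtain ⟨v, t, hvt⟩ := List.exists_cons_of_ne_nil hrev
    have hlast : (x :: rest).getLastD false = v := by
      have h1 : (x :: rest).getLast? = some v := by
        rw [← List.head?_reverse, hvt]; rfl
      simp [List.getLastD_eq_getLast?, h1]
    simp only [foldl_csStep, hvt, foldr_csStep, hlast, csLoop_eq]
    simp
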